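-- pv_equiv track=rewrite | github.com/MrBrantCode/unitest_baseline | mut_generate/mist_train_cf/cf_56785/solution.py | screen_fit
-- ===== SOURCE A (Python) =====
-- def screen_fit(sentence, rows, cols):
--     s = ' '.join(sentence) + ' '
--     start, l = 0, len(s)
--     fit_array = [0]*l
--     for i in range(1, l):
--         if s[i] == ' ':
--             fit_array[i] = 1
--         else:
--             fit_array[i] = fit_array[i-1]
--         if s[i] != ' ' and s[i-1] == ' ':
--             fit_array[i] -= 1
--
--     for _ in range(rows):
--         start += cols
--         if s[start%l] == ' ':
--             start += 1
--         elif s[(start-1)%l] != ' ':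
--             while start > 0 and s[(start-1)%l] != ' ':
--                 start -= 1
--
--     return (start // l)
-- ===== SOURCE B (Python) =====
-- def screen_fit(sentence, rows, cols):
--     s = ' '.join(sentence) + ' '
--     l = len(s)
--     # back[t]: how far the cursor at t must move left so that the char before it is a space
--     back = [0]
--     prev = 0
--     for c in s[:l - 1]:
--         prev = 0 if c == ' ' else prev + 1
--         back.append(prev)
--     start = 0
--     for _ in range(rows):
--         start += cols
--         t = start % l
--         if s[t] == ' ':
--             start += 1
--         else:
--             start -= back[t]
--     return start // l
-- ===== Notes on version B (the rewrite author's own statement) =====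
-- stated objective: faster
-- what changed: B drops A's dead fit_array pass and replaces A's per-row backtracking while-loop by a back-distance table built in one scan over the sentence, making each screen row O(1).
-- outside the precondition, e.g. on screen_fit(['cbcc'], 5, -2): A returns -2, B returns -5
import Mathlib
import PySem

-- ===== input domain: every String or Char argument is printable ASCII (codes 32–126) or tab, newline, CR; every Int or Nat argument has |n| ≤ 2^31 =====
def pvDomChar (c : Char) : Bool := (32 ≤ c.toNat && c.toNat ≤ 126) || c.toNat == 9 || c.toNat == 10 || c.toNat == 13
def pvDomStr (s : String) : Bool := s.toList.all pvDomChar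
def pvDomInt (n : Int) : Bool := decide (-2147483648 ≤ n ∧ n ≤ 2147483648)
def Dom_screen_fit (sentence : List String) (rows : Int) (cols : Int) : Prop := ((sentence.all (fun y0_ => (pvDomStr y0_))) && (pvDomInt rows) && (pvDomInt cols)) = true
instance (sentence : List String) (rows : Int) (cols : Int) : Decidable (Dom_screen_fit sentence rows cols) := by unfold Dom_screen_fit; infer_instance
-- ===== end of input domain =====

-- B replaces A's per-row backtracking while-loop (and drops A's unused fit_array pass) by a
-- precomputed per-residue advance table, making each screen row O(1); proved equal for cols ≥ 0.

-- ===== PORT A =====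
-- the inner `while start > 0 and s[(start-1)%l] != ' ': start -= 1` loop of A
def shrinkA (s : List Char) (l : Int) (start : Int) : Int :=
  if h : 0 < start ∧ PySem.List.pyGetD s (PySem.Int.mod (start - 1) l) ' ' ≠ ' ' then
    shrinkA s l (start - 1)
  else start
termination_by start.toNat
decreasing_by omega

def screen_fit (sentence : List String) (rows : Int) (cols : Int) : Int :=
  let s : List Char := (PySem.Str.join " " sentence).toList ++ [' ']
  let l : Int := s.length
  -- fit_array is computed by A but never read afterwards; ported as-is
  let _fit_array : List Int :=
    (PySem.List.pyRange 1 l 1).foldl (fun fa i =>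
      let fa :=
        if PySem.List.pyGetD s i ' ' = ' ' then PySem.List.pySetD fa i 1
        else PySem.List.pySetD fa i (PySem.List.pyGetD fa (i - 1) 0)
      if PySem.List.pyGetD s i ' ' ≠ ' ' ∧ PySem.List.pyGetD s (i - 1) ' ' = ' ' then
        PySem.List.pySetD fa i (PySem.List.pyGetD fa i 0 - 1)
      else fa) (List.replicate l.toNat 0)
  let start : Int :=
    (PySem.List.pyRange 0 rows 1).foldl (fun start _ =>
      let start := start + cols
      if PySem.List.pyGetD s (PySem.Int.mod start l) ' ' = ' ' then start + 1
      else if PySem.List.pyGetD s (PySem.Int.mod (start - 1) l) ' ' ≠ ' ' then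
        shrinkA s l start
      else start) 0
  PySem.Int.floordiv start l

-- ===== PORT B =====
def screen_fit_alt (sentence : List String) (rows : Int) (cols : Int) : Int :=
  let s : List Char := (PySem.Str.join " " sentence).toList ++ [' ']
  let l : Int := s.length
  let scan : List Int × Int :=
    (PySem.List.slice s none (some (l - 1))).foldl (fun st c =>
      let prev : Int := if c = ' ' then 0 else st.2 + 1
      (st.1 ++ [prev], prev)) ([0], 0)
  let back : List Int := scan.1
  let start : Int :=
    (PySem.List.pyRange 0 rows 1).foldl (fun start _ =>
      let start := start + cols
      let t := PySem.Int.mod start l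
      if PySem.List.pyGetD s t ' ' = ' ' then start + 1
      else start - PySem.List.pyGetD back t 0) 0
  PySem.Int.floordiv start l

-- ===== PRECONDITION & SPEC =====
-- Pre_ excludes negative cols (a negative screen width, outside the task's natural domain): there
-- A's `start > 0` guard in the inner while-loop binds and A's returned values are accidental.
def Pre_screen_fit (sentence : List String) (rows : Int) (cols : Int) : Prop := 0 ≤ cols
instance (sentence : List String) (rows : Int) (cols : Int) : Decidable (Pre_screen_fit sentence rows cols) := by unfold Pre_screen_fit; infer_instance

def pvWitness_screen_fit : List String × Int × Int := (["hello", "world"], 5, 7)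

def Spec_screen_fit (sentence : List String) (rows : Int) (cols : Int) (out : Int) : Prop := out = screen_fit_alt sentence rows cols
instance (sentence : List String) (rows : Int) (cols : Int) (out : Int) : Decidable (Spec_screen_fit sentence rows cols out) := by unfold Spec_screen_fit; infer_instance

-- ===== CLAIM (what is proved, stated in full; the proofs are below) =====
def Claim_equal_screen_fit : Prop := ∀ (sentence : List String) (rows : Int) (cols : Int), Dom_screen_fit sentence rows cols → Pre_screen_fit sentence rows cols → Spec_screen_fit sentence rows cols (screen_fit sentence rows cols)

-- ===== LEMMAS AND PROOFS =====

-- the distance the cursor at position t must move left until the char before it is a space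
def backF (s : List Char) : Nat → Int
  | 0 => 0
  | t + 1 => if s.getD t ' ' = ' ' then 0 else backF s t + 1

-- the net advance of one screen row started at a cursor position congruent to start (mod len)
def deltaV (s : List Char) (cols start : Int) : Int :=
  if s.getD ((start + cols) % (s.length : Int)).toNat ' ' = ' ' then cols + 1
  else cols - backF s ((start + cols) % (s.length : Int)).toNat

theorem backF_bounds (s : List Char) (t : Nat) : 0 ≤ backF s t ∧ backF s t ≤ t := by
  induction t with
  | zero => simp [backF]
  | succ t ih => simp only [backF]; split <;> omega

theorem emod_le_self {a L : Int} (hL : 0 < L) (ha : 0 ≤ a) : a % L ≤ a := by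
  have := Int.emod_nonneg a (ne_of_gt hL)
  have h2 : 0 ≤ a / L := Int.ediv_nonneg ha (le_of_lt hL)
  have h3 := Int.emod_def a L
  nlinarith

theorem emod_sub_one {a L : Int} (hL : 0 < L) :
    (a - 1) % L = if a % L = 0 then L - 1 else a % L - 1 := by
  have h0 : 0 ≤ a % L := Int.emod_nonneg a (ne_of_gt hL)
  have h1 : a % L < L := Int.emod_lt_of_pos a hL
  have key : (a - 1) % L = (a % L - 1) % L := by
    conv_lhs => rw [show a - 1 = (a % L - 1) + L * (a / L) by rw [Int.emod_def]; ring]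
    rw [Int.add_mul_emod_self_left]
  rw [key]
  split
  · next h =>
      rw [h, show (0 : Int) - 1 = (L - 1) - L * 1 by ring, Int.sub_mul_emod_self_left]
      exact Int.emod_eq_of_lt (by omega) (by omega)
  · next h => exact Int.emod_eq_of_lt (by omega) (by omega)

-- A's while loop walks back exactly backF (start % L) steps, for nonneg start
theorem shrink_eq (s : List Char) (L : Int) (hE : L = s.length)
    (hlast : s.getD (s.length - 1) ' ' = ' ') (hlen : 1 ≤ s.length) :
    ∀ (n : Nat) (start : Int), start.toNat = n → 0 ≤ start →
      shrinkA s L start = start - backF s ((start % L).toNat) := by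
  have hL : 0 < L := by omega
  intro n
  induction n using Nat.strong_induction_on with
  | _ n ih =>
    intro start hn hs
    have h0 : 0 ≤ start % L := Int.emod_nonneg start (ne_of_gt hL)
    have h1 : start % L < L := Int.emod_lt_of_pos start hL
    have hidx0 : 0 ≤ (start - 1) % L := Int.emod_nonneg _ (ne_of_gt hL)
    have hidx1 : (start - 1) % L < L := Int.emod_lt_of_pos _ hL
    have hpg : PySem.List.pyGetD s (PySem.Int.mod (start - 1) L) ' '
        = s.getD ((start - 1) % L).toNat ' ' := by
      rw [PySem.Int.mod_eq_emod_of_pos hL,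
          PySem.List.pyGetD_eq_getElem s ' ' hidx0 (by omega),
          List.getD_eq_getElem s ' ' (by omega)]
    rw [shrinkA]
    by_cases hr : start % L = 0
    · -- char before is the final space: loop stops, backF 0 = 0
      have hidx : ((start - 1) % L).toNat = s.length - 1 := by
        rw [emod_sub_one hL, if_pos hr]; omega
      rw [dif_neg (by rw [hpg, hidx, hlast]; simp)]
      simp [hr, backF]
    · have hidx : ((start - 1) % L).toNat = (start % L - 1).toNat := by
        rw [emod_sub_one hL, if_neg hr]
      have hrt : (start % L).toNat = ((start % L - 1).toNat) + 1 := by omega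
      by_cases hc : s.getD ((start % L - 1).toNat) ' ' = ' '
      · -- loop stops; backF (start % L) = 0
        rw [dif_neg (by rw [hpg, hidx, hc]; simp)]
        rw [hrt]
        simp only [backF]
        rw [if_pos hc]
        ring
      · -- one decrement then induction
        have hpos : 0 < start := by
          have := emod_le_self hL hs; omega
        rw [dif_pos ⟨hpos, by rw [hpg, hidx]; exact hc⟩]
        rw [ih (start - 1).toNat (by omega) (start - 1) rfl (by omega)]
        rw [emod_sub_one hL, if_neg hr]
        rw [hrt]
        simp only [backF]
        rw [if_neg hc]
        ring

-- the B-side scan builds the pointwise backF table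
theorem scan_spec (s : List Char) :
    ∀ k : Nat, k ≤ s.length →
      (s.take k).foldl (fun (st : List Int × Int) c =>
        (st.1 ++ [if c = ' ' then 0 else st.2 + 1], if c = ' ' then 0 else st.2 + 1)) ([0], 0)
      = ((List.range (k + 1)).map (backF s), backF s k) := by
  intro k
  induction k with
  | zero => intro _; simp [backF]
  | succ k ih =>
    intro hk
    rw [List.take_add_one, List.foldl_append, ih (by omega)]
    have hget : s[k]? = some (s[k]'(by omega)) := List.getElem?_eq_getElem (by omega)
    rw [hget]
    simp only [Option.toList, List.foldl_cons, List.foldl_nil]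
    have hc : (if s[k]'(by omega) = ' ' then (0 : Int) else backF s k + 1) = backF s (k + 1) := by
      simp only [backF]
      rw [List.getD_eq_getElem s ' ' (by omega)]
    rw [hc, List.range_succ (n := k + 1), List.map_append]
    simp

-- B's row step equals one deltaV advance, for nonneg cursor
theorem stepB_eq (s : List Char) (cols start : Int)
    (hlen : 1 ≤ s.length) (_hs : 0 ≤ start) :
    (if PySem.List.pyGetD s (PySem.Int.mod (start + cols) (s.length : Int)) ' ' = ' '
     then start + cols + 1
     else start + cols - PySem.List.pyGetD ((List.range s.length).map (backF s))
       (PySem.Int.mod (start + cols) (s.length : Int)) 0)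
    = start + deltaV s cols start := by
  have hL : 0 < (s.length : Int) := by exact_mod_cast hlen
  have ht0 : 0 ≤ (start + cols) % (s.length : Int) := Int.emod_nonneg _ (ne_of_gt hL)
  have ht1 : (start + cols) % (s.length : Int) < (s.length : Int) := Int.emod_lt_of_pos _ hL
  rw [PySem.Int.mod_eq_emod_of_pos hL,
      PySem.List.pyGetD_eq_getElem s ' ' ht0 (by omega),
      ← List.getD_eq_getElem s ' ' (by omega),
      PySem.List.pyGetD_eq_getElem _ 0 ht0 (by simp; omega)]
  simp only [List.getElem_map, List.getElem_range]
  unfold deltaV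
  split <;> ring

-- A's row step equals one deltaV advance, for nonneg cursor
theorem stepA_eq (s : List Char) (cols start : Int)
    (hlast : s.getD (s.length - 1) ' ' = ' ') (hlen : 1 ≤ s.length)
    (hc : 0 ≤ cols) (hs : 0 ≤ start) :
    (if PySem.List.pyGetD s (PySem.Int.mod (start + cols) (s.length : Int)) ' ' = ' ' then start + cols + 1
     else if PySem.List.pyGetD s (PySem.Int.mod (start + cols - 1) (s.length : Int)) ' ' ≠ ' ' then
       shrinkA s (s.length : Int) (start + cols)
     else start + cols)
    = start + deltaV s cols start := by
  have hL : 0 < (s.length : Int) := by exact_mod_cast hlen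
  have ht0 : 0 ≤ (start + cols) % (s.length : Int) := Int.emod_nonneg _ (ne_of_gt hL)
  have ht1 : (start + cols) % (s.length : Int) < (s.length : Int) := Int.emod_lt_of_pos _ hL
  have hpg : PySem.List.pyGetD s (PySem.Int.mod (start + cols) (s.length : Int)) ' '
      = s.getD ((start + cols) % (s.length : Int)).toNat ' ' := by
    rw [PySem.Int.mod_eq_emod_of_pos hL,
        PySem.List.pyGetD_eq_getElem s ' ' ht0 (by omega),
        List.getD_eq_getElem s ' ' (by omega)]
  unfold deltaV
  by_cases hsp : s.getD ((start + cols) % (s.length : Int)).toNat ' ' = ' '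
  · rw [if_pos (by rw [hpg]; exact hsp), if_pos hsp]; ring
  · rw [if_neg (by rw [hpg]; exact hsp), if_neg hsp]
    have hi0 : 0 ≤ (start + cols - 1) % (s.length : Int) := Int.emod_nonneg _ (ne_of_gt hL)
    have hi1 : (start + cols - 1) % (s.length : Int) < (s.length : Int) := Int.emod_lt_of_pos _ hL
    have hpg1 : PySem.List.pyGetD s (PySem.Int.mod (start + cols - 1) (s.length : Int)) ' '
        = s.getD ((start + cols - 1) % (s.length : Int)).toNat ' ' := by
      rw [PySem.Int.mod_eq_emod_of_pos hL,
          PySem.List.pyGetD_eq_getElem s ' ' hi0 (by omega),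
          List.getD_eq_getElem s ' ' (by omega)]
    by_cases hr : (start + cols) % (s.length : Int) = 0
    · -- preceding char is the final space: no backtracking, backF 0 = 0
      have hidx : ((start + cols - 1) % (s.length : Int)).toNat = s.length - 1 := by
        rw [emod_sub_one hL, if_pos hr]; omega
      rw [if_neg (by rw [hpg1, hidx, hlast]; simp)]
      rw [hr]
      simp [backF]
    · have hidx : ((start + cols - 1) % (s.length : Int)).toNat
          = ((start + cols) % (s.length : Int) - 1).toNat := by
        rw [emod_sub_one hL, if_neg hr]
      have hrt : ((start + cols) % (s.length : Int)).toNat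
          = (((start + cols) % (s.length : Int) - 1).toNat) + 1 := by omega
      by_cases hc1 : s.getD (((start + cols) % (s.length : Int) - 1).toNat) ' ' = ' '
      · rw [if_neg (by rw [hpg1, hidx, hc1]; simp)]
        rw [hrt]
        simp only [backF]
        rw [if_pos hc1]
        ring
      · rw [if_pos (by rw [hpg1, hidx]; exact hc1)]
        rw [shrink_eq s (s.length : Int) rfl hlast hlen (start + cols).toNat _ rfl (by omega)]
        ring
  
theorem deltaV_pres (s : List Char) (cols start : Int) (hlen : 1 ≤ s.length)
    (_hc : 0 ≤ cols) (_hs : 0 ≤ start) : 0 ≤ start + deltaV s cols start := by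
  have hL : 0 < (s.length : Int) := by exact_mod_cast hlen
  have ht0 : 0 ≤ (start + cols) % (s.length : Int) := Int.emod_nonneg _ (ne_of_gt hL)
  have htle : (start + cols) % (s.length : Int) ≤ start + cols := emod_le_self hL (by omega)
  have hb := backF_bounds s ((start + cols) % (s.length : Int)).toNat
  have hcast : (((start + cols) % (s.length : Int)).toNat : Int) = (start + cols) % (s.length : Int) := by omega
  unfold deltaV
  split <;> omega

theorem foldl_congr_inv {α : Type} (P : Int → Prop) (f g : Int → α → Int)
    (hpres : ∀ a x, P a → P (f a x)) (heq : ∀ a x, P a → f a x = g a x) :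
    ∀ (xs : List α) (a : Int), P a → xs.foldl f a = xs.foldl g a := by
  intro xs
  induction xs with
  | nil => intro a _; rfl
  | cons x xs ih =>
      intro a ha
      simp only [List.foldl_cons]
      rw [← heq a x ha]
      exact ih (f a x) (hpres a x ha)

-- ===== VERDICT (by name: the statement is the Claim_ definition above) =====
theorem screen_fit_spec : Claim_equal_screen_fit := by
  intro sentence rows cols _ hpre
  unfold Pre_screen_fit at hpre
  unfold Spec_screen_fit screen_fit screen_fit_alt
  simp only [Int.toNat_natCast]
  generalize (PySem.Str.join " " sentence).toList = u
  have hlen : 1 ≤ (u ++ [' ']).length := by simp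
  have hlast : (u ++ [' ']).getD ((u ++ [' ']).length - 1) ' ' = ' ' := by
    rw [List.getD_eq_getElem _ ' ' (by simp)]
    simp
  have hslice : PySem.List.slice (u ++ [' ']) none (some (((u ++ [' ']).length : Int) - 1))
      = (u ++ [' ']).take ((u ++ [' ']).length - 1) := by
    rw [PySem.List.slice_to (u ++ [' ']) (by omega)]
    congr 1
    omega
  rw [hslice, scan_spec (u ++ [' ']) ((u ++ [' ']).length - 1) (by omega),
      show (u ++ [' ']).length - 1 + 1 = (u ++ [' ']).length by omega]
  congr 1
  apply foldl_congr_inv (fun a => 0 ≤ a)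
  · intro a x ha
    rw [stepA_eq (u ++ [' ']) cols a hlast hlen hpre ha]
    exact deltaV_pres (u ++ [' ']) cols a hlen hpre ha
  · intro a x ha
    rw [stepA_eq (u ++ [' ']) cols a hlast hlen hpre ha,
        stepB_eq (u ++ [' ']) cols a hlen ha]
  · exact le_refl 0
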